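-- pv_equiv track=rewrite | github.com/EfficientBogoSort/AOC2021 | 2021 - Python/Day 18.py | check_explode
-- ===== SOURCE A (Python) =====
-- def check_explode(num, i):
--     """
--     Checks if an explosion occurs in the current pair
--     Takes as input the snailnumber in the split string form
--     and the index of the opening breacket of the pair
--     Returns whether there was an explosion
--     """
--     openers = 0
--     closer = 0
--     for n in range(i-1, -1, -1):
--         if num[n] == '[':
--             if closer > 0:
--                 closer -= 1
--             else:
--                 openers += 1
--         elif num[n] == ']':
--             closer += 1
--         if openers >= 4:
--             return True
--     return False
-- ===== SOURCE B (Python) =====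
-- def check_explode(num, i):
--     depth = 0
--     for n in range(i):
--         c = num[n]
--         if c == '[':
--             depth += 1
--         elif c == ']':
--             if depth > 0:
--                 depth -= 1
--     return depth >= 4
-- ===== Notes on version B (the rewrite author's own statement) =====
-- stated objective: simpler
-- what changed: Replaces A's backward scan with an openers/closers cancellation pair and an early return by a single forward pass over num[:i] maintaining one clamped bracket depth and checking it once at the end.
import Mathlib
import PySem

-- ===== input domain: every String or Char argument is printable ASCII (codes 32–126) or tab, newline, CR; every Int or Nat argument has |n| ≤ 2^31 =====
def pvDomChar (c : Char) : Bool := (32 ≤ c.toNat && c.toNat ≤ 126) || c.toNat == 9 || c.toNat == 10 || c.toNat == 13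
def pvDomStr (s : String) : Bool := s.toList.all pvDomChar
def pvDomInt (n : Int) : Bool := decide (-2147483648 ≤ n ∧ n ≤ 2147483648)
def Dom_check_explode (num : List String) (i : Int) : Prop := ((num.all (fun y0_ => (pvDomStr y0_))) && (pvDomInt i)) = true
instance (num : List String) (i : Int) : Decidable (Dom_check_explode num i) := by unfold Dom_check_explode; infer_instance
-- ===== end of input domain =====

-- B replaces A's backward openers/closers cancellation scan with an early return by a single
-- forward pass over num[:i] keeping one clamped bracket depth, checked once at the end (simpler).

-- ===== PORT A =====
-- A's backward loop 'for n in range(i-1, -1, -1)' as recursion over the pyRange list,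
-- with the same (openers, closer) state and the same early 'return True'.
def check_explode_go (num : List String) : List Int → Int → Int → Bool
  | [], _, _ => false
  | n :: ns, openers, closer =>
    let s := PySem.List.pyGetD num n ""   -- num[n]; IndexError excluded by Pre_
    let p : Int × Int :=
      if s = "[" then
        (if closer > 0 then (openers, closer - 1) else (openers + 1, closer))
      else if s = "]" then (openers, closer + 1)
      else (openers, closer)
    if 4 ≤ p.1 then true else check_explode_go num ns p.1 p.2

def check_explode (num : List String) (i : Int) : Bool :=
  check_explode_go num (PySem.List.pyRange (i - 1) (-1) (-1)) 0 0

-- ===== PORT B =====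
def check_explode_alt (num : List String) (i : Int) : Bool :=
  let depth := (PySem.List.pyRange 0 i 1).foldl
    (fun depth n =>
      let c := PySem.List.pyGetD num n ""   -- num[n]; IndexError excluded by Pre_
      if c = "[" then depth + 1
      else if c = "]" then (if depth > 0 then depth - 1 else depth)
      else depth) (0 : Int)
  decide (4 ≤ depth)

-- ===== PRECONDITION & SPEC =====
-- Both A and B raise IndexError exactly when i > len(num); only those inputs are excluded.
def Pre_check_explode (num : List String) (i : Int) : Prop := i ≤ PySem.List.len num
instance (num : List String) (i : Int) : Decidable (Pre_check_explode num i) := by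
  unfold Pre_check_explode; infer_instance

def pvWitness_check_explode : List String × Int := (["[", "[", "[", "[", "[", "1"], 5)

def Spec_check_explode (num : List String) (i : Int) (out : Bool) : Prop := out = check_explode_alt num i
instance (num : List String) (i : Int) (out : Bool) : Decidable (Spec_check_explode num i out) := by unfold Spec_check_explode; infer_instance

-- ===== CLAIM (what is proved, stated in full; the proofs are below) =====
def Claim_equal_check_explode : Prop := ∀ (num : List String) (i : Int), Dom_check_explode num i → Pre_check_explode num i → Spec_check_explode num i (check_explode num i)

-- ===== LEMMAS AND PROOFS =====

-- A's backward step on the (openers, closer) pair, on the character itself.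
def bstep (s : Int × Int) (c : String) : Int × Int :=
  if c = "[" then (if s.2 > 0 then (s.1, s.2 - 1) else (s.1 + 1, s.2))
  else if c = "]" then (s.1, s.2 + 1)
  else s

-- A's loop on the list of characters (same order, same early return).
def goS : List String → Int → Int → Bool
  | [], _, _ => false
  | c :: cs, openers, closer =>
    if 4 ≤ (bstep (openers, closer) c).1 then true
    else goS cs (bstep (openers, closer) c).1 (bstep (openers, closer) c).2

-- forward pair scan: (clamped depth, unmatched closers)
def fstep (s : Int × Int) (c : String) : Int × Int :=
  if c = "[" then (s.1 + 1, s.2)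
  else if c = "]" then (if s.1 > 0 then (s.1 - 1, s.2) else (s.1, s.2 + 1))
  else s

-- B's forward step on the single depth.
def dstep (d : Int) (c : String) : Int :=
  if c = "[" then d + 1 else if c = "]" then (if d > 0 then d - 1 else d) else d

theorem bstep_open (s : Int × Int) :
    bstep s "[" = if s.2 > 0 then (s.1, s.2 - 1) else (s.1 + 1, s.2) := by simp [bstep]

theorem bstep_close (s : Int × Int) : bstep s "]" = (s.1, s.2 + 1) := by simp [bstep]

theorem bstep_other (s : Int × Int) (c : String) (h1 : c ≠ "[") (h2 : c ≠ "]") :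
    bstep s c = s := by simp [bstep, h1, h2]

theorem fstep_open' (d k : Int) : fstep (d, k) "[" = (d + 1, k) := by simp [fstep]

theorem fstep_close' (d k : Int) :
    fstep (d, k) "]" = if d > 0 then (d - 1, k) else (d, k + 1) := by simp [fstep]

theorem fstep_close_zero : fstep (0, 0) "]" = (0, 1) := by simp [fstep]

theorem fstep_other' (d k : Int) (c : String) (h1 : c ≠ "[") (h2 : c ≠ "]") :
    fstep (d, k) c = (d, k) := by simp [fstep, h1, h2]

theorem dstep_open (d : Int) : dstep d "[" = d + 1 := by simp [dstep]

theorem dstep_close (d : Int) : dstep d "]" = if d > 0 then d - 1 else d := by simp [dstep]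

theorem dstep_other (d : Int) (c : String) (h1 : c ≠ "[") (h2 : c ≠ "]") :
    dstep d c = d := by simp [dstep, h1, h2]

theorem go_map (num : List String) (l : List Int) (op cl : Int) :
    check_explode_go num l op cl = goS (l.map (fun n => PySem.List.pyGetD num n "")) op cl := by
  induction l generalizing op cl with
  | nil => rfl
  | cons n ns ih =>
      simp only [check_explode_go, goS, List.map_cons, bstep]
      split_ifs <;> simp_all

theorem bstep_fst_le (s : Int × Int) (c : String) : s.1 ≤ (bstep s c).1 := by
  unfold bstep
  split_ifs <;> (try dsimp only) <;> omega

theorem bfold_mono (l : List String) (s : Int × Int) : s.1 ≤ (l.foldl bstep s).1 := by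
  induction l generalizing s with
  | nil => exact le_refl _
  | cons c cs ih =>
      simp only [List.foldl_cons]
      exact le_trans (bstep_fst_le s c) (ih (bstep s c))

theorem goS_eq (l : List String) (op cl : Int) (h : op < 4) :
    goS l op cl = decide (4 ≤ (l.foldl bstep (op, cl)).1) := by
  induction l generalizing op cl with
  | nil => simp [goS]; omega
  | cons c cs ih =>
      simp only [goS, List.foldl_cons]
      by_cases h4 : 4 ≤ (bstep (op, cl) c).1
      · have hmono := bfold_mono cs (bstep (op, cl) c)
        rw [if_pos h4, eq_comm, decide_eq_true_eq]
        omega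
      · rw [if_neg h4, ih _ _ (by omega), Prod.mk.eta]
        rfl

theorem map_pyRange_take_nat (num : List String) (t : Nat) (ht : t ≤ num.length) :
    (PySem.List.pyRange 0 (t : Int) 1).map (fun n => PySem.List.pyGetD num n "") = num.take t := by
  induction t with
  | zero => simp
  | succ k ih =>
      have hk : k ≤ num.length := Nat.le_of_succ_le ht
      have hlt : k < num.length := ht
      have hcast : ((k + 1 : Nat) : Int) = (k : Int) + 1 := by push_cast; ring
      rw [hcast, PySem.List.pyRange_one_succ_right (by positivity)]
      rw [List.map_append, ih hk]
      simp [PySem.List.pyGetD_natCast, List.take_succ, List.getD]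
      simp [List.getElem?_eq_getElem hlt]

theorem map_pyRange_take (num : List String) (i : Int) (hi : i ≤ PySem.List.len num) :
    (PySem.List.pyRange 0 i 1).map (fun n => PySem.List.pyGetD num n "") = num.take i.toNat := by
  by_cases h : i ≤ 0
  · rw [PySem.List.pyRange_one_eq_nil h]
    simp [Int.toNat_of_nonpos h]
  · have h0 : 0 ≤ i := by omega
    have hi' : i.toNat ≤ num.length := by rw [PySem.List.len_eq] at hi; omega
    have := map_pyRange_take_nat num i.toNat hi'
    rwa [Int.toNat_of_nonneg h0] at this

theorem fstep_nonneg (s : Int × Int) (c : String) (hd : 0 ≤ s.1) (hk : 0 ≤ s.2) :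
    0 ≤ (fstep s c).1 ∧ 0 ≤ (fstep s c).2 := by
  unfold fstep
  split_ifs <;> refine ⟨?_, ?_⟩ <;> (try dsimp only) <;> omega

theorem ffold_nonneg (l : List String) (s : Int × Int) (hd : 0 ≤ s.1) (hk : 0 ≤ s.2) :
    0 ≤ (l.foldl fstep s).1 ∧ 0 ≤ (l.foldl fstep s).2 := by
  induction l generalizing s with
  | nil => exact ⟨hd, hk⟩
  | cons c cs ih =>
      simp only [List.foldl_cons]
      exact ih _ (fstep_nonneg s c hd hk).1 (fstep_nonneg s c hd hk).2

-- the forward pair scan from any nonnegative start, in terms of the scan from (0, 0)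
theorem ffold_shift (l : List String) (d k : Int) (hd : 0 ≤ d) (hk : 0 ≤ k) :
    l.foldl fstep (d, k) =
      (d - min d (l.foldl fstep (0, 0)).2 + (l.foldl fstep (0, 0)).1,
       k + (l.foldl fstep (0, 0)).2 - min d (l.foldl fstep (0, 0)).2) := by
  induction l generalizing d k with
  | nil => simp <;> omega
  | cons c cs ih =>
      have hnn := ffold_nonneg cs (0, 0) le_rfl le_rfl
      simp only [List.foldl_cons]
      by_cases h1 : c = "["
      · subst h1
        rw [fstep_open' d k, fstep_open' 0 0]
        rw [ih (d + 1) k (by omega) hk, ih (0 + 1) 0 (by omega) (by omega)]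
        simp <;> omega
      · by_cases h2 : c = "]"
        · subst h2
          rw [fstep_close' d k, fstep_close_zero]
          split_ifs with hp
          · rw [ih (d - 1) k (by omega) hk, ih 0 1 (by omega) (by omega)]
            simp <;> omega
          · rw [ih d (k + 1) hd (by omega), ih 0 1 (by omega) (by omega)]
            simp <;> omega
        · rw [fstep_other' d k c h1 h2, fstep_other' 0 0 c h1 h2]
          exact ih d k hd hk

theorem foldr_bstep (l : List String) :
    l.foldr (fun c s => bstep s c) (0, 0) = l.foldl fstep (0, 0) := by
  induction l with
  | nil => rfl
  | cons c cs ih =>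
      have hnn := ffold_nonneg cs (0, 0) le_rfl le_rfl
      simp only [List.foldr_cons, List.foldl_cons, ih]
      by_cases h1 : c = "["
      · subst h1
        rw [bstep_open, fstep_open' 0 0, ffold_shift cs (0 + 1) 0 (by omega) (by omega)]
        split_ifs with hp <;> simp <;> omega
      · by_cases h2 : c = "]"
        · subst h2
          rw [bstep_close, fstep_close_zero, ffold_shift cs 0 1 (by omega) (by omega)]
          simp <;> omega
        · rw [bstep_other _ c h1 h2, fstep_other' 0 0 c h1 h2]

theorem rev_fold (l : List String) :
    l.reverse.foldl bstep (0, 0) = l.foldl fstep (0, 0) := by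
  rw [List.foldl_reverse]
  exact foldr_bstep l

theorem ffold_fst (l : List String) (d k : Int) :
    (l.foldl fstep (d, k)).1 = l.foldl dstep d := by
  induction l generalizing d k with
  | nil => rfl
  | cons c cs ih =>
      simp only [List.foldl_cons]
      by_cases h1 : c = "["
      · subst h1
        rw [fstep_open' d k, dstep_open]
        exact ih (d + 1) k
      · by_cases h2 : c = "]"
        · subst h2
          rw [fstep_close' d k, dstep_close]
          split_ifs with hp
          · exact ih (d - 1) k
          · exact ih d (k + 1)
        · rw [fstep_other' d k c h1 h2, dstep_other d c h1 h2]
          exact ih d k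

-- ===== VERDICT (by name: the statement is the Claim_ definition above) =====
theorem check_explode_spec : Claim_equal_check_explode := by
  intro num i _ hPre
  unfold Spec_check_explode
  have hrange : PySem.List.pyRange (i - 1) (-1) (-1) = (PySem.List.pyRange 0 i 1).reverse := by
    simpa using PySem.List.pyRange_neg_one_eq_reverse (i - 1) (-1)
  have hA : check_explode num i
      = decide (4 ≤ ((num.take i.toNat).reverse.foldl bstep (0, 0)).1) := by
    unfold check_explode
    rw [hrange, go_map, List.map_reverse, map_pyRange_take num i hPre,
        goS_eq _ _ _ (by norm_num)]
  have hz2 : check_explode_alt num i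
      = decide (4 ≤ (PySem.List.pyRange 0 i 1).foldl
          (fun depth n => dstep depth (PySem.List.pyGetD num n "")) 0) := rfl
  have key2 : ∀ (l : List Int) (d : Int),
      l.foldl (fun acc n => dstep acc (PySem.List.pyGetD num n "")) d
      = (l.map (fun n => PySem.List.pyGetD num n "")).foldl dstep d := by
    intro l d
    rw [List.foldl_map]
  rw [hA, hz2, key2 (PySem.List.pyRange 0 i 1) 0, map_pyRange_take num i hPre,
      rev_fold, ffold_fst]
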